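-- pv_equiv track=rewrite | github.com/Nidhood/Algorithm_analysis | taller_4/taller_4/heuristic_solver.py | generate_valid_assignments
-- ===== SOURCE A (Python) =====
-- import itertools
--
-- def generate_valid_assignments(constraints):
--     if not constraints:
--         return []
--
--     # Recopilar todas las casillas ocultas unicas
--     all_hidden = set()
--     for (hidden, _) in constraints:
--         all_hidden.update(hidden)
--     all_hidden = list(all_hidden)
--
--     # Si no hay casillas ocultas, retornar vacío
--     if not all_hidden:
--         return []
--
--     # Generar todas las posibles combinaciones de minas
--     valid_assignments = []
--     n = len(all_hidden)
--
--     # Para cada posible numero de minas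
--     for r in range(0, n + 1):
--
--         # Para cada combinación de tamano r
--         for combo in itertools.combinations(all_hidden, r):
--             mines_combo = set(combo)
--             valid = True
--
--             # Verificar contra cada restriccion
--
--             for (hidden_list, required) in constraints:
--
--                 # Contar minas en esta restriccion
--                 count = len(mines_combo & set(hidden_list))
--
--                 # Si no cumple, descartar
--                 if count != required:
--                     valid = False
--                     break
--
--             if valid:
--                 valid_assignments.append(mines_combo)
--
--     return valid_assignments
-- ===== SOURCE B (Python) =====
-- def _feasible(needed, rest):
--     # every remaining requirement must be satisfiable by the cells still ahead
--     return all(0 <= req <= sum(1 for c in rest if c in h) for h, req in needed)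
--
--
-- def _search(r, cells, needed):
--     # all size-r subsequences of `cells` whose counts meet every requirement in `needed`
--     if r == 0:
--         return [[]] if all(req == 0 for _, req in needed) else []
--     if not cells:
--         return []
--     x, rest = cells[0], cells[1:]
--     needed_in = [(h, req - 1 if x in h else req) for h, req in needed]
--     out = []
--     if _feasible(needed_in, rest):
--         out += [[x] + t for t in _search(r - 1, rest, needed_in)]
--     if _feasible(needed, rest):
--         out += _search(r, rest, needed)
--     return out
--
--
-- def generate_valid_assignments(constraints):
--     if not constraints:
--         return []
--     all_hidden = set()
--     for (hidden, _) in constraints: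
--         all_hidden.update(hidden)
--     all_hidden = list(all_hidden)
--     if not all_hidden:
--         return []
--     results = []
--     for r in range(len(all_hidden) + 1):
--         results.extend(set(t) for t in _search(r, all_hidden, list(constraints)))
--     return results
-- ===== Notes on version B (the rewrite author's own statement) =====
-- stated objective: alternative
-- what changed: A enumerates every one of the 2^n subsets of the hidden cells via itertools.combinations and tests each against all constraints with set intersections; B runs a recursive backtracking search that propagates per-constraint remaining requirements cell by cell and prunes any branch whose requirements have become negative or exceed the cells still ahead.
import Mathlib
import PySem

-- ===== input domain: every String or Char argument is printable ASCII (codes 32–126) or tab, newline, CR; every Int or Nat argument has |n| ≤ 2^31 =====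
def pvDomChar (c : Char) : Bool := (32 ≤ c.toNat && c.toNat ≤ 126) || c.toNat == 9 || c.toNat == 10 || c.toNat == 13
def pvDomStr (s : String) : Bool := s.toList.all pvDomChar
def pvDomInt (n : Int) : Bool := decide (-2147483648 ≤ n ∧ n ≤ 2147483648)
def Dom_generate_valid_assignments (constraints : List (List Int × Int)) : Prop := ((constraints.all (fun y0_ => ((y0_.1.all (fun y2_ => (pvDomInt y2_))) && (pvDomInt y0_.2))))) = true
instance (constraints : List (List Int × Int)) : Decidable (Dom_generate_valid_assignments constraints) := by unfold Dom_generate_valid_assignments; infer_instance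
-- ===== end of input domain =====

-- B replaces A's generate-every-combination-and-test enumeration with a pruned backtracking
-- search (per-constraint remaining requirements propagated cell by cell); equivalence is about
-- the returned value (A returns Python sets, ports carry their distinct-element lists).

-- ===== PORT A =====
-- itertools.combinations(xs, r) in itertools' lexicographic order
def pvCombos (xs : List Int) (r : Nat) : List (List Int) :=
  match r, xs with
  | 0, _ => [[]]
  | _ + 1, [] => []
  | r + 1, x :: rest => (pvCombos rest r).map (fun t => x :: t) ++ pvCombos rest (r + 1)

def generate_valid_assignments (constraints : List (List Int × Int)) : List (List Int) :=
  if constraints = [] then []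
  else
    -- all_hidden = set(); for (hidden, _) in constraints: all_hidden.update(hidden)
    let all_hidden : PySem.Set Int :=
      constraints.foldl (fun s p => PySem.Set.update s p.1) PySem.Set.empty
    if all_hidden = [] then []
    else
      let n := all_hidden.length
      -- for r in range(0, n+1): for combo in combinations(all_hidden, r): …
      (PySem.List.pyRange 0 ((n : Int) + 1)).foldl (fun acc r =>
        (pvCombos all_hidden r.toNat).foldl (fun acc combo =>
          let mines := PySem.Set.ofList combo
          -- the for-with-break over constraints computes: every constraint is met
          let valid := constraints.all (fun hr =>
            PySem.Set.len (PySem.Set.inter mines (PySem.Set.ofList hr.1)) == hr.2)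
          if valid then acc ++ [mines] else acc) acc) []

-- ===== PORT B =====
-- every remaining requirement must be satisfiable by the cells still ahead
def pvFeasible (needed : List (List Int × Int)) (rest : List Int) : Bool :=
  needed.all (fun hr =>
    decide (0 ≤ hr.2) && decide (hr.2 ≤ (rest.countP (fun c => decide (c ∈ hr.1)) : Int)))

-- all size-r subsequences of `cells` whose counts meet every requirement in `needed`
def pvSearch (r : Nat) (cells : List Int) (needed : List (List Int × Int)) : List (List Int) :=
  match r, cells with
  | 0, _ => if needed.all (fun hr => hr.2 == 0) then [[]] else []
  | _ + 1, [] => []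
  | r + 1, x :: rest =>
    let neededIn := needed.map (fun hr => (hr.1, if x ∈ hr.1 then hr.2 - 1 else hr.2))
    (if pvFeasible neededIn rest then (pvSearch r rest neededIn).map (fun t => x :: t) else []) ++
    (if pvFeasible needed rest then pvSearch (r + 1) rest needed else [])

def generate_valid_assignments_alt (constraints : List (List Int × Int)) : List (List Int) :=
  if constraints = [] then []
  else
    let all_hidden : PySem.Set Int :=
      constraints.foldl (fun s p => PySem.Set.update s p.1) PySem.Set.empty
    if all_hidden = [] then []
    else
      (List.range (all_hidden.length + 1)).flatMap (fun r => pvSearch r all_hidden constraints)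

-- ===== PRECONDITION & SPEC =====
def Spec_generate_valid_assignments (constraints : List (List Int × Int)) (out : List (List Int)) : Prop := out = generate_valid_assignments_alt constraints
instance (constraints : List (List Int × Int)) (out : List (List Int)) : Decidable (Spec_generate_valid_assignments constraints out) := by unfold Spec_generate_valid_assignments; infer_instance

-- ===== CLAIM (what is proved, stated in full; the proofs are below) =====
def Claim_equal_generate_valid_assignments : Prop := ∀ (constraints : List (List Int × Int)), Dom_generate_valid_assignments constraints → Spec_generate_valid_assignments constraints (generate_valid_assignments constraints)

-- ===== LEMMAS AND PROOFS =====

-- the requirement check, as a predicate of the chosen subset alone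
def pvOk (needed : List (List Int × Int)) (t : List Int) : Bool :=
  needed.all (fun hr => ((t.countP (fun c => decide (c ∈ hr.1)) : Int) == hr.2))

-- members of pvCombos are subsequences of xs
theorem pvCombos_sublist : ∀ (xs : List Int) (r : Nat) (t : List Int),
    t ∈ pvCombos xs r → t.Sublist xs := by
  intro xs
  induction xs with
  | nil =>
      intro r t ht
      cases r with
      | zero => simp [pvCombos] at ht; simp [ht]
      | succ r => simp [pvCombos] at ht
  | cons x rest ih =>
      intro r t ht
      cases r with
      | zero => simp [pvCombos] at ht; simp [ht]
      | succ r =>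
          simp only [pvCombos, List.mem_append, List.mem_map] at ht
          rcases ht with ⟨u, hu, rfl⟩ | ht
          · exact List.Sublist.cons₂ x (ih r u hu)
          · exact List.Sublist.cons x (ih (r + 1) t ht)

-- picking x turns the requirement check into the check against the decremented requirements
theorem pvOk_cons (needed : List (List Int × Int)) (x : Int) (t : List Int) :
    pvOk needed (x :: t)
      = pvOk (needed.map (fun hr => (hr.1, if x ∈ hr.1 then hr.2 - 1 else hr.2))) t := by
  have pt : ∀ hr : List Int × Int,
      ((((x :: t).countP (fun c => decide (c ∈ hr.1)) : Nat) : Int) == hr.2)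
        = (((t.countP (fun c => decide (c ∈ hr.1)) : Nat) : Int)
            == (if x ∈ hr.1 then hr.2 - 1 else hr.2)) := by
    intro hr
    apply Bool.eq_iff_iff.mpr
    by_cases hx : x ∈ hr.1 <;>
      simp [hx, beq_iff_eq] <;> omega
  simp only [pvOk, List.all_map]
  simp only [pt]
  rfl

-- when some remaining requirement is unsatisfiable, no combination passes the check
theorem pvFilter_nil_of_not_feasible (needed : List (List Int × Int)) (rest : List Int)
    (r : Nat) (h : pvFeasible needed rest = false) :
    (pvCombos rest r).filter (pvOk needed) = [] := by
  rw [List.filter_eq_nil_iff]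
  intro t ht
  have hsub := pvCombos_sublist rest r t ht
  simp only [pvFeasible, List.all_eq_false] at h
  obtain ⟨hr, hmem, hbad⟩ := h
  intro hall
  simp only [pvOk, List.all_eq_true, beq_iff_eq] at hall
  have h2 := hall hr hmem
  have hle := List.Sublist.countP_le (p := fun c => decide (c ∈ hr.1)) hsub
  apply hbad
  simp only [Bool.and_eq_true, decide_eq_true_eq]
  exact ⟨by omega, by omega⟩

-- the backtracking search computes exactly the filter of the combination list
set_option maxRecDepth 4096 in
theorem pvSearch_eq_filter : ∀ (cells : List Int) (r : Nat) (needed : List (List Int × Int)),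
    pvSearch r cells needed = (pvCombos cells r).filter (pvOk needed) := by
  intro cells
  induction cells with
  | nil =>
      intro r needed
      cases r with
      | zero =>
          simp only [pvSearch, pvCombos, List.filter_cons, List.filter_nil, pvOk,
            List.countP_nil, Nat.cast_zero]
          rw [show (fun hr : List Int × Int => ((0 : Int) == hr.2))
              = (fun hr : List Int × Int => hr.2 == 0) from
            funext fun hr => Bool.beq_comm ..]
      | succ r => simp [pvSearch, pvCombos]
  | cons x rest ih =>
      intro r needed
      cases r with
      | zero =>
          simp only [pvSearch, pvCombos, List.filter_cons, List.filter_nil, pvOk,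
            List.countP_nil, Nat.cast_zero]
          rw [show (fun hr : List Int × Int => ((0 : Int) == hr.2))
              = (fun hr : List Int × Int => hr.2 == 0) from
            funext fun hr => Bool.beq_comm ..]
      | succ r =>
          simp only [pvSearch, pvCombos, List.filter_append, List.filter_map]
          have hcons : (pvOk needed ∘ fun t => x :: t)
              = pvOk (needed.map (fun hr => (hr.1, if x ∈ hr.1 then hr.2 - 1 else hr.2))) := by
            funext t; exact pvOk_cons needed x t
          rw [hcons]
          congr 1
          · cases hfe : pvFeasible
                (needed.map (fun hr => (hr.1, if x ∈ hr.1 then hr.2 - 1 else hr.2))) rest with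
            | true =>
                rw [if_pos rfl, ih r (needed.map (fun hr => (hr.1, if x ∈ hr.1 then hr.2 - 1 else hr.2)))]
            | false =>
                rw [if_neg (by simp),
                  pvFilter_nil_of_not_feasible _ rest r hfe, List.map_nil]
          · cases hfe : pvFeasible needed rest with
            | true => rw [if_pos rfl]; exact ih (r + 1) needed
            | false =>
                rw [if_neg (by simp), pvFilter_nil_of_not_feasible needed rest (r + 1) hfe]

-- the hidden-cell accumulator has no duplicates
theorem pvAllHidden_nodup (constraints : List (List Int × Int)) :
    (constraints.foldl (fun s p => PySem.Set.update s p.1) PySem.Set.empty).Nodup := by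
  have gen : ∀ (cs : List (List Int × Int)) (s : PySem.Set Int), s.Nodup →
      (cs.foldl (fun s p => PySem.Set.update s p.1) s).Nodup := by
    intro cs
    induction cs with
    | nil => intro s hs; exact hs
    | cons c rest ih =>
        intro s hs
        exact ih (PySem.Set.update s c.1) (PySem.Set.nodup_update s c.1 hs)
  exact gen constraints PySem.Set.empty List.nodup_nil

-- A's per-combination set test agrees with pvOk on duplicate-free combos
theorem pvValid_eq_ok (constraints : List (List Int × Int)) (combo : List Int)
    (h : combo.Nodup) :
    (constraints.all (fun hr =>
      PySem.Set.len (PySem.Set.inter (PySem.Set.ofList combo) (PySem.Set.ofList hr.1)) == hr.2))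
      = pvOk constraints combo := by
  have pt : ∀ hr : List Int × Int,
      (PySem.Set.len (PySem.Set.inter (PySem.Set.ofList combo) (PySem.Set.ofList hr.1))) 
        = ((combo.countP (fun c => decide (c ∈ hr.1)) : Nat) : Int) := by
    intro hr
    rw [PySem.Set.ofList_eq_self_of_nodup combo h]
    simp only [PySem.Set.len, PySem.Set.inter, List.countP_eq_length_filter]
    congr 1
    refine congrArg List.length (List.filter_congr ?_)
    intro c _
    apply Bool.eq_iff_iff.mpr
    simp [PySem.Set.mem_ofList]
  unfold pvOk
  congr 1
  funext hr
  rw [pt hr]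

-- ===== VERDICT (by name: the statement is the Claim_ definition above) =====
theorem generate_valid_assignments_spec : Claim_equal_generate_valid_assignments := by
  intro constraints _
  unfold Spec_generate_valid_assignments generate_valid_assignments generate_valid_assignments_alt
  by_cases h1 : constraints = []
  · simp [h1]
  · rw [if_neg h1, if_neg h1]
    have hnodup := pvAllHidden_nodup constraints
    set AH := constraints.foldl (fun s p => PySem.Set.update s p.1) PySem.Set.empty with hAH
    by_cases h2 : AH = []
    · rw [if_pos h2, if_pos h2]
    · rw [if_neg h2, if_neg h2]
      simp only [PySem.List.foldl_append_if, PySem.List.foldl_append_eq_flatMap,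
        List.nil_append]
      rw [show ((AH.length : Int) + 1) = ((AH.length + 1 : Nat) : Int) by push_cast; ring,
        PySem.List.pyRange_zero_natCast, List.flatMap_map]
      have per_r : ∀ r : Nat,
          ((pvCombos AH r).filter (fun combo => constraints.all (fun hr =>
              PySem.Set.len (PySem.Set.inter (PySem.Set.ofList combo)
                (PySem.Set.ofList hr.1)) == hr.2))).map PySem.Set.ofList
            = pvSearch r AH constraints := by
        intro r
        rw [pvSearch_eq_filter AH r constraints]
        rw [List.filter_congr (fun combo hc =>
          pvValid_eq_ok constraints combo
            ((pvCombos_sublist AH r combo hc).nodup hnodup))]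
        rw [List.map_congr_left (fun t ht =>
          PySem.Set.ofList_eq_self_of_nodup t
            ((pvCombos_sublist AH r t (List.mem_of_mem_filter ht)).nodup hnodup)),
          List.map_id_fun']
        rfl
      simp only [Int.toNat_natCast, per_r]
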